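-- pv_equiv track=rewrite | github.com/jungs04/Ejercicios-prologl-y-Py | ejercicio_mpp.py | donde_esta
-- ===== SOURCE A (Python) =====
-- def donde_esta(X,Y):
-- 	if not X:
-- 		return []
-- 	if len(X):
-- 		if Y == X[0][0]:
-- 			return X[0][1]
-- 		else:
-- 			return donde_esta(X[1:],Y)
-- ===== SOURCE B (Python) =====
-- def donde_esta(X, Y):
--     for pair in X:
--         if Y == pair[0]:
--             return pair[1]
--     return []
-- ===== Notes on version B (the rewrite author's own statement) =====
-- stated objective: simpler
-- what changed: Replaces A's tail recursion with list slicing (X[1:]) by a single iterative for-loop over the pairs with an early return.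
import Mathlib
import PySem

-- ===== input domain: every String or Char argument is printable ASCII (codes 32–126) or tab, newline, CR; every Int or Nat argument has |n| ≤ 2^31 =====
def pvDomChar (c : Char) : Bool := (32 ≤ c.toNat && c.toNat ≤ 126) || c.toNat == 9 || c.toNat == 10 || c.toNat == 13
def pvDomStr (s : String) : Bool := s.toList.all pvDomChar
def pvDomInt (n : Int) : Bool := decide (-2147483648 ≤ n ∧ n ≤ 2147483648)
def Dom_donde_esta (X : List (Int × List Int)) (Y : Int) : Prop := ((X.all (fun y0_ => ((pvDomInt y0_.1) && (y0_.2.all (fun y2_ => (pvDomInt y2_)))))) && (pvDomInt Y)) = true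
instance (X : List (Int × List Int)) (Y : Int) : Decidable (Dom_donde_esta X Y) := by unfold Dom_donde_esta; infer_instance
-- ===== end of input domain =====

-- B replaces A's tail recursion on the slice X[1:] by a single iterative pass over the pairs (objective: simpler).

-- ===== PORT A =====
-- literal transliteration: 'if not X: return []', then X[0][0]/X[0][1], recursive call on X[1:]
def donde_esta (X : List (Int × List Int)) (Y : Int) : List Int :=
  if h : X = [] then []
  else
    if Y == (PySem.List.pyGetD X 0 (0, [])).1 then (PySem.List.pyGetD X 0 (0, [])).2
    else donde_esta (PySem.List.slice X (some 1) none) Y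
termination_by X.length
decreasing_by
  rw [PySem.List.slice_from_one]
  cases X with
  | nil => exact absurd rfl h
  | cons a t => simp

-- ===== PORT B =====
-- for pair in X: if Y == pair[0]: return pair[1];  after the loop: return []
def donde_esta_alt (X : List (Int × List Int)) (Y : Int) : List Int :=
  match X with
  | [] => []
  | p :: rest => if Y == p.1 then p.2 else donde_esta_alt rest Y

-- ===== PRECONDITION & SPEC =====
def Spec_donde_esta (X : List (Int × List Int)) (Y : Int) (out : List Int) : Prop := out = donde_esta_alt X Y
instance (X : List (Int × List Int)) (Y : Int) (out : List Int) : Decidable (Spec_donde_esta X Y out) := by unfold Spec_donde_esta; infer_instance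

-- ===== CLAIM (what is proved, stated in full; the proofs are below) =====
def Claim_equal_donde_esta : Prop := ∀ (X : List (Int × List Int)) (Y : Int), Dom_donde_esta X Y → Spec_donde_esta X Y (donde_esta X Y)

-- ===== LEMMAS AND PROOFS =====
theorem donde_esta_eq_alt (X : List (Int × List Int)) (Y : Int) :
    donde_esta X Y = donde_esta_alt X Y := by
  induction X with
  | nil => simp [donde_esta, donde_esta_alt]
  | cons p rest ih =>
    rw [donde_esta]
    simp only [PySem.List.slice_from_one, List.tail_cons]
    simp [donde_esta_alt, PySem.List.pyGetD_zero_cons, ih]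

-- ===== VERDICT (by name: the statement is the Claim_ definition above) =====
theorem donde_esta_spec : Claim_equal_donde_esta := by
  intro X Y _
  exact donde_esta_eq_alt X Y
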